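-- pv_equiv track=rewrite | github.com/nobsun/tessoku-book | test/case/B38/etc/testcase_gen.py | solve
-- ===== SOURCE A (Python) =====
-- def solve(n: int, s: str) -> int:
--     ans = [1] * n
--     b_start = -1
--     for i in range(n-1):
--         if s[i] == 'A':
--             if b_start != -1:
--                 ans[b_start] = i - b_start + 1
--                 for j in range(b_start+1, i+1):
--                     ans[j] = ans[j-1] - 1
--                 if b_start != 0 and ans[b_start-1] >= ans[b_start]:
--                     ans[b_start] = ans[b_start-1]+1
--                 b_start = -1
--             ans[i + 1] = ans[i] + 1
--         elif b_start == -1: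
--             b_start = i
--
--     if b_start != -1:
--         ans[b_start] = n - b_start
--         for j in range(b_start + 1, n):
--             ans[j] = ans[j - 1] - 1
--         if b_start != 0 and ans[b_start-1] >= ans[b_start]:
--             ans[b_start] = ans[b_start-1]+1
--     return sum(ans)
-- ===== SOURCE B (Python) =====
-- def solve(n: int, s: str) -> int:
--     ans = [1] * n
--     for i in range(n - 1):
--         if s[i] == 'A':
--             ans[i + 1] = ans[i] + 1
--     for i in range(n - 2, -1, -1):
--         if s[i] != 'A':
--             ans[i] = max(ans[i], ans[i + 1] + 1)
--     return sum(ans)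
-- ===== Notes on version B (the rewrite author's own statement) =====
-- stated objective: simpler
-- what changed: Replaced A's one-pass segment/boundary state machine (b_start tracking, in-place descending refill of each closed run plus a boundary fix-up) by the standard two-pass candy algorithm: a forward pass incrementing after 'A' and a backward pass taking max with the right neighbour after non-'A'.
import Mathlib
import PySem

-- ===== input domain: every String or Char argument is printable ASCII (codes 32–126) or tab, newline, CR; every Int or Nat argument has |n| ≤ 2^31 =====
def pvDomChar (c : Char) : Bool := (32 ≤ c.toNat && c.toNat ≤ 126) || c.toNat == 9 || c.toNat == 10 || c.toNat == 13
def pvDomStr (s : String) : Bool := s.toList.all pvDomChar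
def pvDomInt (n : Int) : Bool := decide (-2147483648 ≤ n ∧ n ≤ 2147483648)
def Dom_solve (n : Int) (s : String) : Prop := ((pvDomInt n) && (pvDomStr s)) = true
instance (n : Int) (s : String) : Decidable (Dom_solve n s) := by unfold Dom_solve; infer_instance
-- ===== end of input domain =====

-- B replaces A's one-pass segment/boundary state machine by the standard two-pass candy
-- algorithm (forward 'A'-increments, backward max with the right neighbour); objective: simpler.

-- ===== PORT A =====
-- list read/write with a Python-style int index; exact for 0 ≤ i < len, which holds for
-- every access A performs inside Pre_solve (out of range, Python raises: outside Pre_solve).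
def aget (l : List Int) (i : Int) : Int := l.getD i.toNat 0
def aset (l : List Int) (i : Int) (v : Int) : List Int := l.set i.toNat v

-- inner loop 'for j in range(j, stop): ans[j] = ans[j-1] - 1'
def fillA (l : List Int) (j stop : Int) : List Int :=
  if j < stop then fillA (aset l j (aget l (j - 1) - 1)) (j + 1) stop else l
termination_by (stop - j).toNat
decreasing_by omega

-- the run-closing block A performs twice: ans[b] = stop-b; the fill; the boundary fix
-- (in the loop stop = i+1, so ans[b] = i-b+1; in the final block stop = n, so ans[b] = n-b)
def closeA (l : List Int) (b stop : Int) : List Int :=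
  let l1 := aset l b (stop - b)
  let l2 := fillA l1 (b + 1) stop
  if b ≠ 0 ∧ aget l2 (b - 1) ≥ aget l2 b then aset l2 b (aget l2 (b - 1) + 1) else l2

-- 'for i in range(n-1)' with state (ans, b_start); s[i] read via getD (exact inside Pre_solve)
def loopA (cs : List Char) (m : Nat) (i : Nat) (ans : List Int) (b : Int) : List Int × Int :=
  if i < m then
    if cs.getD i ' ' = 'A' then
      let ab := if b ≠ -1 then (closeA ans b ((i : Int) + 1), (-1 : Int)) else (ans, b)
      loopA cs m (i + 1) (aset ab.1 ((i : Int) + 1) (aget ab.1 (i : Int) + 1)) ab.2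
    else if b = -1 then loopA cs m (i + 1) ans (i : Int)
    else loopA cs m (i + 1) ans b
  else (ans, b)
termination_by m - i
decreasing_by all_goals omega

def solve (n : Int) (s : String) : Int :=
  let cs := s.toList
  let ans0 := List.replicate n.toNat 1
  let ab := loopA cs (n - 1).toNat 0 ans0 (-1)
  let ans := if ab.2 ≠ -1 then closeA ab.1 ab.2 n else ab.1
  ans.sum

-- ===== PORT B =====
-- forward pass: for i in range(n-1): if s[i]=='A': ans[i+1] = ans[i] + 1
def pass1 (cs : List Char) (m : Nat) (i : Nat) (ans : List Int) : List Int :=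
  if i < m then
    pass1 cs m (i + 1)
      (if cs.getD i ' ' = 'A' then ans.set (i + 1) (ans.getD i 0 + 1) else ans)
  else ans
termination_by m - i
decreasing_by omega

-- backward pass: for i in range(n-2,-1,-1): if s[i]!='A': ans[i] = max(ans[i], ans[i+1]+1);
-- pass2 (k+1) processes index k, then recurses downwards.
def pass2 (cs : List Char) : Nat → List Int → List Int
  | 0, ans => ans
  | k + 1, ans =>
      pass2 cs k
        (if cs.getD k ' ' ≠ 'A' then ans.set k (max (ans.getD k 0) (ans.getD (k + 1) 0 + 1)) else ans)

def solve_alt (n : Int) (s : String) : Int :=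
  let cs := s.toList
  let ans0 := List.replicate n.toNat 1
  let ans1 := pass1 cs (n - 1).toNat 0 ans0
  let ans2 := pass2 cs (n - 1).toNat ans1
  ans2.sum

-- ===== PRECONDITION & SPEC =====
-- exactly the inputs on which A returns: A reads s[0..n-2], so it raises IndexError iff n > len(s)+1
def Pre_solve (n : Int) (s : String) : Prop := n ≤ (s.toList.length : Int) + 1
instance (n : Int) (s : String) : Decidable (Pre_solve n s) := by unfold Pre_solve; infer_instance
def pvWitness_solve : Int × String := (3, "AB")

def Spec_solve (n : Int) (s : String) (out : Int) : Prop := out = solve_alt n s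
instance (n : Int) (s : String) (out : Int) : Decidable (Spec_solve n s out) := by unfold Spec_solve; infer_instance

-- ===== CLAIM (what is proved, stated in full; the proofs are below) =====
def Claim_equal_solve : Prop := ∀ (n : Int) (s : String), Dom_solve n s → Pre_solve n s → Spec_solve n s (solve n s)

-- ===== LEMMAS AND PROOFS =====

-- candies forced from the left: 1 + length of the maximal 'A'-run ending just before i
def upF (cs : List Char) (m : Nat) : Nat → Int
  | 0 => 1
  | i + 1 => if i < m ∧ cs.getD i ' ' = 'A' then upF cs m i + 1 else 1

-- candies forced from the right: 1 + consecutive non-'A' chars from i on, inside s[:m]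
def downF (cs : List Char) (m : Nat) (i : Nat) : Int :=
  if i < m ∧ cs.getD i ' ' ≠ 'A' then downF cs m (i + 1) + 1 else 1
termination_by m - i
decreasing_by omega

-- the value both programs leave at index i
def gF (cs : List Char) (m : Nat) (i : Nat) : Int := max (upF cs m i) (downF cs m i)

theorem one_le_upF (cs : List Char) (m : Nat) (i : Nat) : 1 ≤ upF cs m i := by
  cases i with
  | zero => simp [upF]
  | succ i => unfold upF; split <;> [have := one_le_upF cs m i; skip] <;> omega

theorem one_le_downF (cs : List Char) (m : Nat) (i : Nat) : 1 ≤ downF cs m i := by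
  rw [downF]
  split
  · have := one_le_downF cs m (i + 1); omega
  · omega
termination_by m - i
decreasing_by omega

theorem getD_set (l : List Int) (k j : Nat) (v : Int) :
    (l.set k v).getD j 0 = if k = j ∧ j < l.length then v else l.getD j 0 := by
  simp only [List.getD_eq_getElem?_getD, List.getElem?_set]
  split_ifs with h1 h2 h3 h4 <;> simp_all

@[simp] theorem aget_natCast (l : List Int) (k : Nat) : aget l (k : Int) = l.getD k 0 := by
  simp [aget]

@[simp] theorem aset_natCast (l : List Int) (k : Nat) (v : Int) :
    aset l (k : Int) v = l.set k v := by
  simp [aset]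

theorem aget_natCast_sub_one (l : List Int) (k : Nat) (h : 1 ≤ k) :
    aget l ((k : Int) - 1) = l.getD (k - 1) 0 := by
  have h2 : ((k : Int) - 1).toNat = k - 1 := by omega
  simp [aget, h2]

-- downF on a closed run: chars j..e-1 are non-'A' and the run stops at e
theorem downF_run (cs : List Char) (m : Nat) (e : Nat)
    (hend : ¬ (e < m ∧ cs.getD e ' ' ≠ 'A'))
    (j : Nat) (hje : j ≤ e) (hem : e ≤ m)
    (hrun : ∀ t, j ≤ t → t < e → cs.getD t ' ' ≠ 'A') :
      downF cs m j = (e : Int) - j + 1 := by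
  rcases Nat.lt_or_ge j e with hlt | hge
  · rw [downF]
    rw [if_pos ⟨by omega, hrun j le_rfl hlt⟩]
    have := downF_run cs m e hend (j + 1) (by omega) hem (fun t h1 h2 => hrun t (by omega) h2)
    rw [this]; push_cast; ring
  · have hj : j = e := by omega
    subst hj
    rw [downF, if_neg hend]; omega
termination_by e - j
decreasing_by omega

theorem fillA_spec (l : List Int) (j stop : Nat) (hj : 1 ≤ j) (hstop : stop ≤ l.length) :
    (fillA l (j : Int) (stop : Int)).length = l.length ∧
    ∀ t, t < l.length → (fillA l (j : Int) (stop : Int)).getD t 0 =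
      if j ≤ t ∧ t < stop then l.getD (j - 1) 0 - ((t : Int) - (j : Int) + 1) else l.getD t 0 := by
  rcases Nat.lt_or_ge j stop with hlt | hge
  · rw [fillA, if_pos (by exact_mod_cast hlt)]
    rw [aget_natCast_sub_one l j hj, aset_natCast]
    set v := l.getD (j - 1) 0 - 1 with hv
    set l' := l.set j v with hl'
    have hlen' : l'.length = l.length := by simp [hl']
    have hcast : ((j : Int) + 1) = ((j + 1 : Nat) : Int) := by push_cast; ring
    rw [hcast]
    have IH := fillA_spec l' (j + 1) stop (by omega) (by omega)
    constructor
    · rw [IH.1, hlen']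
    · intro t ht
      rw [IH.2 t (by omega)]
      have hjl : j < l.length := by omega
      have h1 : l'.getD (j + 1 - 1) 0 = v := by
        rw [hl']
        simpa using (getD_set l j (j + 1 - 1) v).trans (if_pos ⟨by omega, by omega⟩)
      have h2 : ∀ u, u < l.length → u ≠ j → l'.getD u 0 = l.getD u 0 := by
        intro u hu hne
        rw [hl', getD_set, if_neg (by rintro ⟨h, -⟩; exact hne h.symm)]
      by_cases hc : j + 1 ≤ t ∧ t < stop
      · rw [if_pos hc, if_pos ⟨by omega, hc.2⟩, h1, hv]
        push_cast; ring
      · rw [if_neg hc]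
        by_cases hteq : t = j
        · subst hteq
          rw [if_pos ⟨le_rfl, hlt⟩]
          have : l'.getD t 0 = v := by
            rw [hl', getD_set, if_pos ⟨rfl, hjl⟩]
          rw [this, hv]; ring
        · rw [h2 t ht hteq, if_neg (by omega)]
  · rw [fillA, if_neg (by exact_mod_cast Nat.not_lt.mpr hge)]
    exact ⟨rfl, fun t ht => by rw [if_neg (by omega)]⟩
termination_by stop - j
decreasing_by omega

theorem closeA_spec (cs : List Char) (m nn : Nat) (hnm : nn = m + 1)
    (l : List Int) (hlen : l.length = nn) (bn e : Nat)
    (hbe : bn ≤ e) (hem : e ≤ m)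
    (hend : e = m ∨ cs.getD e ' ' = 'A')
    (hrun : ∀ t, bn ≤ t → t < e → cs.getD t ' ' ≠ 'A')
    (hb : bn = 0 ∨ cs.getD (bn - 1) ' ' = 'A')
    (hl : ∀ j, j < nn → l.getD j 0 =
      if j < bn then gF cs m j else if j = bn then upF cs m bn else 1) :
    (closeA l (bn : Int) ((e : Int) + 1)).length = nn ∧
    ∀ j, j < nn → (closeA l (bn : Int) ((e : Int) + 1)).getD j 0 =
      if j ≤ e then gF cs m j else 1 := by
  have hend' : ¬ (e < m ∧ cs.getD e ' ' ≠ 'A') := by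
    rcases hend with h | h
    · omega
    · rintro ⟨-, h2⟩; exact h2 h
  have hD : ∀ t, bn ≤ t → t ≤ e → downF cs m t = (e : Int) - t + 1 := by
    intro t h1 h2
    exact downF_run cs m e hend' t h2 hem (fun u hu1 hu2 => hrun u (by omega) hu2)
  have hU : ∀ t, bn < t → t ≤ e → upF cs m t = 1 := by
    intro t h1 h2
    obtain ⟨u, rfl⟩ : ∃ u, t = u + 1 := ⟨t - 1, by omega⟩
    show (if u < m ∧ cs.getD u ' ' = 'A' then upF cs m u + 1 else 1) = 1
    rw [if_neg (by rintro ⟨-, h⟩; exact hrun u (by omega) (by omega) h)]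
  have hgF_mid : ∀ t, bn < t → t ≤ e → gF cs m t = (e : Int) - t + 1 := by
    intro t h1 h2
    have := one_le_downF cs m t
    rw [gF, hU t h1 h2, hD t (by omega) h2]
    omega
  -- unfold closeA
  rw [closeA]
  have hcast1 : ((bn : Int) + 1) = ((bn + 1 : Nat) : Int) := by push_cast; ring
  have hcast2 : ((e : Int) + 1) = ((e + 1 : Nat) : Int) := by push_cast; ring
  rw [aset_natCast]
  set L1 : List Int := l.set bn ((e : Int) + 1 - (bn : Int)) with hL1
  have hlen1 : L1.length = nn := by simp [hL1, hlen]
  rw [hcast1, hcast2]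
  have hfill := fillA_spec L1 (bn + 1) (e + 1) (by omega) (by omega)
  set L2 : List Int := fillA L1 ((bn + 1 : Nat) : Int) ((e + 1 : Nat) : Int) with hL2
  have hlen2 : L2.length = nn := by rw [hfill.1, hlen1]
  have hbnl : bn < l.length := by omega
  have hL1bn : L1.getD bn 0 = (e : Int) + 1 - bn := by
    rw [hL1, getD_set, if_pos ⟨rfl, hbnl⟩]
  have hL1other : ∀ u, u ≠ bn → L1.getD u 0 = l.getD u 0 := by
    intro u hne
    rw [hL1, getD_set, if_neg (by rintro ⟨h, -⟩; exact hne h.symm)]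
  have hl2val : ∀ j, j < nn → L2.getD j 0 =
      if j < bn then gF cs m j
      else if j = bn then (e : Int) + 1 - bn
      else if j ≤ e then (e : Int) + 1 - j else 1 := by
    intro j hj
    rw [hL2, hfill.2 j (by omega)]
    by_cases hc : bn + 1 ≤ j ∧ j < e + 1
    · rw [if_pos hc]
      have : bn + 1 - 1 = bn := by omega
      rw [this, hL1bn]
      rw [if_neg (by omega), if_neg (by omega), if_pos (by omega)]
      push_cast; ring
    · rw [if_neg hc]
      by_cases hjb : j = bn
      · subst hjb
        rw [hL1bn, if_neg (by omega), if_pos rfl]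
      · rw [hL1other j hjb]
        rcases Nat.lt_or_ge j bn with h1 | h1
        · rw [hl j hj, if_pos h1, if_pos h1]
        · have hje : ¬ j ≤ e := by omega
          rw [hl j hj, if_neg (by omega), if_neg hjb, if_neg (by omega), if_neg hjb,
            if_neg (by omega)]
  -- the boundary fix
  rcases Nat.eq_zero_or_pos bn with hbn0 | hbn1
  · subst hbn0
    rw [if_neg (by simp)]
    refine ⟨hlen2, fun j hj => ?_⟩
    rw [hl2val j hj]
    have hg0 : gF cs m 0 = (e : Int) + 1 := by
      have h1 : upF cs m 0 = 1 := rfl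
      have h2 := hD 0 (by omega) (by omega)
      rw [gF, h1, h2]; push_cast; omega
    by_cases hje : j ≤ e
    · rcases Nat.eq_zero_or_pos j with rfl | hj1
      · simp only [if_neg (lt_irrefl 0), if_pos hje, hg0]; push_cast; ring
      · rw [if_neg (by omega), if_neg (by omega), if_pos hje, if_pos hje,
          hgF_mid j (by omega) hje]
        omega
    · rw [if_neg (by omega), if_neg (by omega), if_neg hje, if_neg hje]
  · -- bn ≥ 1
    have hbm : bn - 1 < m := by omega
    have hcsA : cs.getD (bn - 1) ' ' = 'A' := hb.resolve_left (by omega)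
    have hupbn : upF cs m bn = upF cs m (bn - 1) + 1 := by
      obtain ⟨u, hu⟩ : ∃ u, bn = u + 1 := ⟨bn - 1, by omega⟩
      rw [hu]
      show (if u < m ∧ cs.getD u ' ' = 'A' then upF cs m u + 1 else 1) = _
      rw [if_pos ⟨by omega, by rw [show u = bn - 1 by omega]; exact hcsA⟩]
      congr 2
    have hdownbn1 : downF cs m (bn - 1) = 1 := by
      rw [downF, if_neg (by rintro ⟨-, h⟩; exact h hcsA)]
    have hgbn1 : gF cs m (bn - 1) = upF cs m (bn - 1) := by
      have := one_le_upF cs m (bn - 1)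
      rw [gF, hdownbn1]; omega
    have hL2prev : aget L2 ((bn : Int) - 1) = upF cs m (bn - 1) := by
      rw [aget_natCast_sub_one L2 bn hbn1, hl2val (bn - 1) (by omega), if_pos (by omega), hgbn1]
    have hL2bn : aget L2 (bn : Int) = (e : Int) + 1 - bn := by
      rw [aget_natCast, hl2val bn (by omega), if_neg (by omega), if_pos rfl]
    have hdownbn : downF cs m bn = (e : Int) + 1 - bn := by
      rw [hD bn le_rfl hbe]; ring
    by_cases hcond : upF cs m (bn - 1) ≥ (e : Int) + 1 - bn
    · rw [if_pos ⟨by exact_mod_cast Nat.cast_ne_zero.mpr (by omega), by rw [hL2prev, hL2bn]; exact hcond⟩]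
      rw [hL2prev, aset_natCast]
      refine ⟨by simp [hlen2], fun j hj => ?_⟩
      rw [getD_set]
      by_cases hjb : j = bn
      · rw [if_pos ⟨hjb.symm, by omega⟩, hjb, if_pos hbe]
        have hg : gF cs m bn = upF cs m bn := by
          rw [gF, hdownbn, hupbn]; omega
        rw [hg, hupbn]
      · rw [if_neg (by rintro ⟨h, -⟩; exact hjb h.symm), hl2val j hj]
        rcases Nat.lt_or_ge j bn with h1 | h1
        · rw [if_pos h1, if_pos (by omega)]
        · by_cases hje : j ≤ e
          · rw [if_neg (by omega), if_neg hjb, if_pos hje, if_pos hje,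
              hgF_mid j (by omega) hje]
            omega
          · rw [if_neg (by omega), if_neg hjb, if_neg hje, if_neg hje]
    · rw [if_neg (by rw [hL2prev, hL2bn]; rintro ⟨-, h⟩; exact hcond h)]
      refine ⟨hlen2, fun j hj => ?_⟩
      rw [hl2val j hj]
      by_cases hjb : j = bn
      · rw [hjb, if_neg (by omega), if_pos rfl, if_pos hbe]
        have hg : gF cs m bn = downF cs m bn := by
          rw [gF, hdownbn, hupbn]; omega
        rw [hg, hdownbn]
      · rcases Nat.lt_or_ge j bn with h1 | h1
        · rw [if_pos h1, if_pos (by omega)]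
        · by_cases hje : j ≤ e
          · rw [if_neg (by omega), if_neg hjb, if_pos hje, if_pos hje,
              hgF_mid j (by omega) hje]
            omega
          · rw [if_neg (by omega), if_neg hjb, if_neg hje, if_neg hje]

-- the loop invariant of A's forward scan
def InvA (cs : List Char) (m nn : Nat) (i : Nat) (ans : List Int) (b : Int) : Prop :=
  ans.length = nn ∧
  ((b = -1 ∧ (i = 0 ∨ cs.getD (i - 1) ' ' = 'A') ∧
      ∀ j, j < nn → ans.getD j 0 =
        if j < i then gF cs m j else if j = i then upF cs m i else 1)
   ∨ (∃ bn : Nat, b = (bn : Int) ∧ bn < i ∧ (bn = 0 ∨ cs.getD (bn - 1) ' ' = 'A') ∧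
      (∀ t, bn ≤ t → t < i → cs.getD t ' ' ≠ 'A') ∧
      ∀ j, j < nn → ans.getD j 0 =
        if j < bn then gF cs m j else if j = bn then upF cs m bn else 1))

theorem loopA_inv (cs : List Char) (m nn : Nat) (hnm : nn = m + 1) :
    ∀ i ans b, i ≤ m → InvA cs m nn i ans b →
      InvA cs m nn m (loopA cs m i ans b).1 (loopA cs m i ans b).2 := by
  intro i ans b him hInv
  rcases Nat.lt_or_ge i m with hlt | hge
  · obtain ⟨hlen, hdis⟩ := hInv
    rw [loopA, if_pos hlt]
    by_cases hA : cs.getD i ' ' = 'A'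
    · rw [if_pos hA]
      rcases hdis with ⟨hb1, hside, hval⟩ | ⟨bn, rfl, hbi, hb0, hrunA, hval⟩
      · -- b = -1, char 'A': just propagate
        subst hb1
        have hiv : ans.getD i 0 = upF cs m i := by
          rw [hval i (by omega), if_neg (lt_irrefl i), if_pos rfl]
        refine loopA_inv cs m nn hnm (i + 1) _ _ (by omega) ?_
        show InvA cs m nn (i + 1) (ans.set (i + 1) (ans.getD i 0 + 1)) (-1)
        rw [hiv]
        refine ⟨by simp [hlen], Or.inl ⟨rfl, Or.inr (by simpa using hA), fun j hj => ?_⟩⟩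
        rw [getD_set]
        by_cases hji : j = i + 1
        · rw [if_pos ⟨hji.symm, by omega⟩, hji, if_neg (by omega), if_pos rfl]
          show upF cs m i + 1 = upF cs m (i + 1)
          rw [show upF cs m (i + 1) = if i < m ∧ cs.getD i ' ' = 'A' then upF cs m i + 1 else 1 from rfl,
            if_pos ⟨hlt, hA⟩]
        · rw [if_neg (by rintro ⟨h, -⟩; exact hji h.symm), hval j hj]
          rcases Nat.lt_or_ge j i with h1 | h1
          · rw [if_pos h1, if_pos (by omega)]
          · by_cases hji2 : j = i
            · rw [hji2, if_neg (lt_irrefl i), if_pos rfl, if_pos (by omega)]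
              have hdi : downF cs m i = 1 := by
                rw [downF, if_neg (by rintro ⟨-, h⟩; exact h hA)]
              have := one_le_upF cs m i
              rw [gF, hdi]; omega
            · rw [if_neg (by omega), if_neg hji2, if_neg (by omega), if_neg (by omega)]
      · -- b = bn ≥ 0, char 'A': close the run, then bump i+1
        rw [if_pos (by omega : (bn : Int) ≠ -1)]
        have hclose := closeA_spec cs m nn hnm ans hlen bn i (by omega) (by omega)
          (Or.inr hA) hrunA hb0 hval
        set L : List Int := closeA ans (bn : Int) ((i : Int) + 1) with hL
        have hLi : aget L (i : Int) = gF cs m i := by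
          rw [aget_natCast, hclose.2 i (by omega), if_pos le_rfl]
        have hupi : upF cs m i = 1 := by
          obtain ⟨u, hu⟩ : ∃ u, i = u + 1 := ⟨i - 1, by omega⟩
          rw [hu]
          show (if u < m ∧ cs.getD u ' ' = 'A' then upF cs m u + 1 else 1) = 1
          rw [if_neg (by rintro ⟨-, h⟩; exact hrunA u (by omega) (by omega) h)]
        have hdowni : downF cs m i = 1 := by
          rw [downF, if_neg (by rintro ⟨-, h⟩; exact h hA)]
        have hgi : gF cs m i = 1 := by rw [gF, hupi, hdowni]; omega
        have hup1 : upF cs m (i + 1) = 2 := by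
          rw [show upF cs m (i + 1) = if i < m ∧ cs.getD i ' ' = 'A' then upF cs m i + 1 else 1 from rfl,
            if_pos ⟨hlt, hA⟩, hupi]
          omega
        refine loopA_inv cs m nn hnm (i + 1) _ _ (by omega) ?_
        show InvA cs m nn (i + 1) (L.set (i + 1) (L.getD i 0 + 1)) (-1)
        have hLi' : L.getD i 0 = 1 := by
          rw [hclose.2 i (by omega), if_pos le_rfl, hgi]
        rw [hLi']
        refine ⟨by simp [hclose.1], Or.inl ⟨rfl, Or.inr (by simpa using hA), fun j hj => ?_⟩⟩
        rw [getD_set]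
        by_cases hji : j = i + 1
        · rw [if_pos ⟨hji.symm, by rw [hclose.1]; omega⟩, hji, if_neg (by omega), if_pos rfl, hup1]
          omega
        · rw [if_neg (by rintro ⟨h, -⟩; exact hji h.symm), hclose.2 j hj]
          rcases Nat.lt_or_ge j (i + 1) with h1 | h1
          · rw [if_pos (by omega : j ≤ i), if_pos (by omega : j < i + 1)]
          · rw [if_neg (by omega : ¬ j ≤ i), if_neg (by omega : ¬ j < i + 1), if_neg hji]
    · rw [if_neg hA]
      rcases hdis with ⟨hb1, hside, hval⟩ | ⟨bn, rfl, hbi, hb0, hrunA, hval⟩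
      · -- b = -1, char not 'A': open a run at i
        subst hb1
        rw [if_pos rfl]
        apply loopA_inv cs m nn hnm (i + 1) _ _ (by omega)
        refine ⟨hlen, Or.inr ⟨i, rfl, by omega, ?_, ?_, hval⟩⟩
        · rcases hside with h | h
          · exact Or.inl h
          · exact Or.inr h
        · intro t h1 h2
          rw [show t = i by omega]
          exact hA
      · -- in a run, char not 'A': extend the run
        rw [if_neg (by omega : ¬ ((bn : Int) = -1))]
        apply loopA_inv cs m nn hnm (i + 1) _ _ (by omega)
        refine ⟨hlen, Or.inr ⟨bn, rfl, by omega, hb0, ?_, hval⟩⟩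
        intro t h1 h2
        rcases Nat.lt_or_ge t i with h3 | h3
        · exact hrunA t h1 h3
        · rw [show t = i by omega]; exact hA
  · have hieq : i = m := by omega
    subst hieq
    rw [loopA, if_neg (by omega)]
    exact ⟨hInv.1, hInv.2⟩
termination_by i _ _ _ => m - i
decreasing_by all_goals omega

theorem pass1_spec (cs : List Char) (m nn : Nat) (hnm : nn = m + 1) :
    ∀ i ans, i ≤ m → ans.length = nn →
      (∀ j, j < nn → ans.getD j 0 = if j ≤ i then upF cs m j else 1) →
      (pass1 cs m i ans).length = nn ∧
      ∀ j, j < nn → (pass1 cs m i ans).getD j 0 = upF cs m j := by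
  intro i ans him hlen hval
  rcases Nat.lt_or_ge i m with hlt | hge
  · rw [pass1, if_pos hlt]
    by_cases hA : cs.getD i ' ' = 'A'
    · rw [if_pos hA]
      have hiv : ans.getD i 0 = upF cs m i := by
        rw [hval i (by omega), if_pos le_rfl]
      apply pass1_spec cs m nn hnm (i + 1) _ (by omega) (by simp [hlen])
      intro j hj
      rw [getD_set]
      by_cases hji : j = i + 1
      · rw [if_pos ⟨hji.symm, by omega⟩, hji, if_pos le_rfl, hiv]
        show upF cs m i + 1 = upF cs m (i + 1)
        rw [show upF cs m (i + 1) = if i < m ∧ cs.getD i ' ' = 'A' then upF cs m i + 1 else 1 from rfl,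
          if_pos ⟨hlt, hA⟩]
      · rw [if_neg (by rintro ⟨h, -⟩; exact hji h.symm), hval j hj]
        rcases Nat.lt_or_ge j (i + 1) with h1 | h1
        · rw [if_pos (by omega : j ≤ i), if_pos (by omega : j ≤ i + 1)]
        · rw [if_neg (by omega : ¬ j ≤ i), if_neg (by omega : ¬ j ≤ i + 1)]
    · rw [if_neg hA]
      apply pass1_spec cs m nn hnm (i + 1) _ (by omega) hlen
      intro j hj
      rw [hval j hj]
      by_cases hji : j = i + 1
      · rw [hji, if_neg (by omega : ¬ i + 1 ≤ i), if_pos le_rfl]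
        show (1 : Int) = upF cs m (i + 1)
        rw [show upF cs m (i + 1) = if i < m ∧ cs.getD i ' ' = 'A' then upF cs m i + 1 else 1 from rfl,
          if_neg (by rintro ⟨-, h⟩; exact hA h)]
      · rcases Nat.lt_or_ge j (i + 1) with h1 | h1
        · rw [if_pos (by omega : j ≤ i), if_pos (by omega : j ≤ i + 1)]
        · rw [if_neg (by omega : ¬ j ≤ i), if_neg (by omega : ¬ j ≤ i + 1)]
  · rw [pass1, if_neg (by omega)]
    refine ⟨hlen, fun j hj => ?_⟩
    rw [hval j hj, if_pos (by omega)]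
termination_by i _ _ => m - i
decreasing_by all_goals omega

theorem pass2_spec (cs : List Char) (m nn : Nat) (hnm : nn = m + 1) :
    ∀ k ans, k ≤ m → ans.length = nn →
      (∀ j, j < nn → ans.getD j 0 = if j < k then upF cs m j else gF cs m j) →
      (pass2 cs k ans).length = nn ∧
      ∀ j, j < nn → (pass2 cs k ans).getD j 0 = gF cs m j := by
  intro k
  induction k with
  | zero =>
      intro ans _ hlen hval
      rw [pass2]
      refine ⟨hlen, fun j hj => ?_⟩
      rw [hval j hj, if_neg (by omega)]
  | succ k IH =>
      intro ans hkm hlen hval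
      rw [pass2]
      by_cases hA : cs.getD k ' ' = 'A'
      · rw [if_neg (not_not_intro hA)]
        apply IH ans (by omega) hlen
        intro j hj
        rw [hval j hj]
        by_cases hjk : j = k
        · rw [hjk, if_pos (by omega), if_neg (lt_irrefl k)]
          have hdk : downF cs m k = 1 := by
            rw [downF, if_neg (by rintro ⟨-, h⟩; exact h hA)]
          have := one_le_upF cs m k
          rw [gF, hdk]; omega
        · rcases Nat.lt_or_ge j k with h1 | h1
          · rw [if_pos h1, if_pos (by omega)]
          · rw [if_neg (by omega : ¬ j < k), if_neg (by omega : ¬ j < k + 1)]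
      · rw [if_pos hA]
        have hk1 : k + 1 < nn := by omega
        have hvk : ans.getD k 0 = upF cs m k := by
          rw [hval k (by omega), if_pos (by omega)]
        have hvk1 : ans.getD (k + 1) 0 = gF cs m (k + 1) := by
          rw [hval (k + 1) hk1, if_neg (by omega)]
        have hup1 : upF cs m (k + 1) = 1 := by
          rw [show upF cs m (k + 1) = if k < m ∧ cs.getD k ' ' = 'A' then upF cs m k + 1 else 1 from rfl,
            if_neg (by rintro ⟨-, h⟩; exact hA h)]
        have hg1 : gF cs m (k + 1) = downF cs m (k + 1) := by
          have := one_le_downF cs m (k + 1)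
          rw [gF, hup1]; omega
        have hdk : downF cs m k = downF cs m (k + 1) + 1 := by
          rw [downF, if_pos ⟨by omega, hA⟩]
        apply IH _ (by omega) (by simp [hlen])
        intro j hj
        rw [getD_set]
        by_cases hjk : j = k
        · rw [if_pos ⟨hjk.symm, by omega⟩, hjk, if_neg (lt_irrefl k), hvk, hvk1, hg1]
          rw [gF, hdk]
        · rw [if_neg (by rintro ⟨h, -⟩; exact hjk h.symm), hval j hj]
          rcases Nat.lt_or_ge j k with h1 | h1
          · rw [if_pos h1, if_pos (by omega)]
          · rw [if_neg (by omega : ¬ j < k), if_neg (by omega : ¬ j < k + 1)]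

theorem list_eq_of_getD (l1 l2 : List Int) (hlen : l1.length = l2.length)
    (h : ∀ j, j < l1.length → l1.getD j 0 = l2.getD j 0) : l1 = l2 := by
  apply List.ext_getElem hlen
  intro j h1 h2
  have := h j h1
  simpa [List.getD_eq_getElem?_getD, List.getElem?_eq_getElem, h1, h2] using this

theorem getD_replicate_one (nn j : Nat) (hj : j < nn) :
    (List.replicate nn (1 : Int)).getD j 0 = 1 := by
  rw [List.getD_eq_getElem?_getD, List.getElem?_replicate, if_pos hj]
  rfl

-- ===== VERDICT (by name: the statement is the Claim_ definition above) =====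
theorem solve_spec : Claim_equal_solve := by
  unfold Claim_equal_solve
  intro n s _ _
  unfold Spec_solve
  by_cases hn : n ≤ 0
  · have h1 : n.toNat = 0 := by omega
    have h2 : (n - 1).toNat = 0 := by omega
    simp [solve, solve_alt, h1, h2, loopA, pass1, pass2]
  · have hn' : 0 < n := by omega
    set cs : List Char := s.toList with hcs
    set m : Nat := (n - 1).toNat with hm
    set nn : Nat := n.toNat with hnn
    have hnm : nn = m + 1 := by omega
    have hmn : ((m : Int)) + 1 = n := by omega
    have hgm : gF cs m m = upF cs m m := by
      have h1 : downF cs m m = 1 := by rw [downF, if_neg (by omega)]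
      have h2 := one_le_upF cs m m
      rw [gF, h1]; omega
    -- A side: run the loop invariant
    have hInv0 : InvA cs m nn 0 (List.replicate nn 1) (-1) := by
      refine ⟨by simp, Or.inl ⟨rfl, Or.inl rfl, fun j hj => ?_⟩⟩
      rw [getD_replicate_one nn j hj, if_neg (Nat.not_lt_zero j)]
      by_cases hj0 : j = 0
      · rw [if_pos hj0]; rfl
      · rw [if_neg hj0]
    have hA := loopA_inv cs m nn hnm 0 (List.replicate nn 1) (-1) (by omega) hInv0
    set AB := loopA cs m 0 (List.replicate nn 1) (-1) with hAB
    have hsolve : solve n s =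
        (if AB.2 ≠ -1 then closeA AB.1 AB.2 n else AB.1).sum := rfl
    obtain ⟨hlenA, hdis⟩ := hA
    have hAfin : ∃ ansA : List Int, solve n s = ansA.sum ∧ ansA.length = nn ∧
        ∀ j, j < nn → ansA.getD j 0 = gF cs m j := by
      rcases hdis with ⟨hb, hside, hval⟩ | ⟨bn, hb, hbm, hb0, hrun, hval⟩
      · refine ⟨AB.1, by rw [hsolve, if_neg (by rw [hb]; simp)], hlenA, fun j hj => ?_⟩
        rw [hval j hj]
        rcases Nat.lt_or_ge j m with h1 | h1
        · rw [if_pos h1]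
        · have hjm : j = m := by omega
          rw [if_neg (by omega), if_pos hjm, hjm, hgm]
      · have hclose := closeA_spec cs m nn hnm AB.1 hlenA bn m (by omega) le_rfl
          (Or.inl rfl) (fun t h1 h2 => hrun t h1 h2) hb0 hval
        refine ⟨closeA AB.1 (bn : Int) ((m : Int) + 1),
          by rw [hsolve, if_pos (by rw [hb]; omega), hb, hmn], hclose.1, fun j hj => ?_⟩
        rw [hclose.2 j hj, if_pos (by omega)]
    -- B side
    have hp1 := pass1_spec cs m nn hnm 0 (List.replicate nn 1) (by omega) (by simp)
      (fun j hj => by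
        rw [getD_replicate_one nn j hj]
        by_cases hj0 : j = 0
        · rw [if_pos (by omega : j ≤ 0), hj0]; rfl
        · rw [if_neg (by omega : ¬ j ≤ 0)])
    have hp2 := pass2_spec cs m nn hnm m (pass1 cs m 0 (List.replicate nn 1)) le_rfl hp1.1
      (fun j hj => by
        rw [hp1.2 j hj]
        rcases Nat.lt_or_ge j m with h1 | h1
        · rw [if_pos h1]
        · have hjm : j = m := by omega
          rw [if_neg (by omega), hjm, hgm])
    have hsolveB : solve_alt n s =
        (pass2 cs m (pass1 cs m 0 (List.replicate nn 1))).sum := rfl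
    obtain ⟨ansA, hsA, hlA, hvA⟩ := hAfin
    rw [hsA, hsolveB]
    have : ansA = pass2 cs m (pass1 cs m 0 (List.replicate nn 1)) := by
      apply list_eq_of_getD _ _ (by rw [hlA, hp2.1])
      intro j hj
      rw [hvA j (by omega), hp2.2 j (by omega)]
    rw [this]
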